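-- pv_equiv track=rewrite | github.com/paullu-ualberta/Rabin.Fingerprint | Alpha/rabin_fingerprint.py | compute_outgoing_table
-- ===== SOURCE A (Python) =====
-- def compute_outgoing_table(irreducible, degree):
--     table = [0] * 256
--     divs = [0] * 8
--     for i in range(8):
--         divs[i] = divide_polynomial(1 << (i + degree + 1), irreducible)
--     for byte in range(256):
--         poly_sum = 0
--         bcopy = byte
--         for i in range(8):
--             if byte & 1 > 0:
--                 poly_sum ^=  divs[i]
--             byte >>= 1
--         table[bcopy] = poly_sum
--     return table
--
-- def divide_polynomial(p1, p2): #return p1 - p2. Assuming p1 >= p2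
--     mask = 1
--     org_p2 = p2
--     while mask <= p2: #Align the mask to be one bit higher than the leading coefficient of p2
--         mask = mask << 1
--     while mask <= p1: #Push the mask and p2 left untill the mask is one bit higher than p1, making
--                       #the leading coefficients of p1 and p2 line up
--         mask = mask << 1
--         p2 = p2 << 1
--     mask = mask >> 1 #The mask is now inline with the leading coefficient of p1
--     while p2 >= org_p2:
--         if mask & p1 > 0: #If there is a coefficient in the place being currently looked at
--             p1 = p1 ^ p2 #Subtract p2 from p1
--         mask = mask >> 1 #Move the mask and p2 over
--         p2 = p2 >> 1
--     return p1 #Return the remainder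
-- ===== SOURCE B (Python) =====
-- def poly_mod(p1, p2):
--     # GF(2) long division driven by bit lengths: repeatedly cancel p1's leading
--     # term against p2 shifted up to it; a divisor without a positive leading term
--     # leaves p1 unchanged.
--     if p2 > 0:
--         while p1.bit_length() >= p2.bit_length():
--             p1 ^= p2 << (p1.bit_length() - p2.bit_length())
--     return p1
--
-- def compute_outgoing_table(irreducible, degree):
--     # block-doubling build: after processing bit i the table holds all bytes < 2**(i+1);
--     # the upper half is the lower half XOR the div of bit i, so no per-byte bit loop is needed.
--     table = [0]
--     for i in range(8):
--         d = poly_mod(1 << (i + degree + 1), irreducible)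
--         table = table + [x ^ d for x in table]
--     return table
-- ===== Notes on version B (the rewrite author's own statement) =====
-- stated objective: alternative
-- what changed: Both stages are rebuilt: the mask-walking three-loop polynomial division becomes a bit_length-driven GF(2) reduction (p1 ^= p2 << (p1.bit_length()-p2.bit_length()) while it fits), and the 256-entry outer loop with a per-byte 8-iteration bit-test/shift inner loop becomes a block-doubling build where each of the 8 steps appends a copy of the current table XORed with that bit's div, so entries derive from earlier entries and the inner bit loop disappears.
import Mathlib
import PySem

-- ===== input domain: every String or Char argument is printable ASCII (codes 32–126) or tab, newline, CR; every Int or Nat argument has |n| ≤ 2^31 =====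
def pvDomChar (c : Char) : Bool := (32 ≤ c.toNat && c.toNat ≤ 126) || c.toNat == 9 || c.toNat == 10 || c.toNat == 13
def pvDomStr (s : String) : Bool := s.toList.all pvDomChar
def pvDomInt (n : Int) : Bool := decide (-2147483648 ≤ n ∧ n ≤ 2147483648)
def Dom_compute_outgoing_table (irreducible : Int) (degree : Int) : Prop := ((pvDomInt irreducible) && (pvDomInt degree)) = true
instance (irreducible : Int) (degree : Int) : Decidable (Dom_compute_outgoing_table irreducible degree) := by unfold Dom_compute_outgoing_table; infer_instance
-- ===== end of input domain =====

-- B rebuilds both halves of the algorithm differently: the mask-walking three-loop division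
-- helper becomes a bit_length-driven GF(2) reduction, and the 256-entry loop with a per-byte
-- 8-iteration inner bit loop becomes a block-doubling build (each of the 8 steps appends a copy
-- of the table XORed with one div), so the inner bit loop disappears.
-- Under Pre_ (irreducible ≠ 0, degree ≥ -1) every value these programs compute is a nonnegative
-- Python int, so the ports carry the arithmetic on Nat (shifts = *2 / /2, ^ = Nat.xor,
-- int.bit_length = Nat.size): exact there.

-- ===== PORT A =====
-- divide_polynomial: while mask <= p2: mask <<= 1   (the '0 < mask' conjunct only makes the
-- recursion total; mask starts at 1)
def dpLoop1 (mask p2 : Nat) : Nat :=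
  if 0 < mask ∧ mask ≤ p2 then dpLoop1 (mask * 2) p2 else mask
termination_by p2 + 1 - mask
decreasing_by omega

-- while mask <= p1: mask <<= 1; p2 <<= 1
def dpLoop2 (mask p2 p1 : Nat) : Nat × Nat :=
  if 0 < mask ∧ mask ≤ p1 then dpLoop2 (mask * 2) (p2 * 2) p1 else (mask, p2)
termination_by p1 + 1 - mask
decreasing_by omega

-- while p2 >= org_p2: …   (the '1 ≤ org' conjunct only makes the recursion total; under Pre_ the
-- Python loop runs exactly when 1 ≤ org ∧ org ≤ p2: for irreducible < 0 Python skips it too, see Pre_ note)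
def dpLoop3 (p1 p2 mask org : Nat) : Nat :=
  if h : 1 ≤ org ∧ org ≤ p2 then
    dpLoop3 (if mask &&& p1 > 0 then p1 ^^^ p2 else p1) (p2 / 2) (mask / 2) org
  else p1
termination_by p2
decreasing_by omega

def dividePolynomial (p1 p2 : Nat) : Nat :=
  let mask := dpLoop1 1 p2
  let mp := dpLoop2 mask p2 p1
  dpLoop3 p1 mp.2 (mp.1 / 2) p2

-- divs[i] = divide_polynomial(1 << (i + degree + 1), irreducible)
def dpDivs (irreducible degree : Int) : List Nat :=
  (List.range 8).foldl
    (fun ds (i : Nat) => ds.set i (dividePolynomial (2 ^ (((i : Int) + degree + 1).toNat)) irreducible.toNat))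
    (List.replicate 8 0)

def compute_outgoing_table (irreducible : Int) (degree : Int) : List Int :=
  let divs := dpDivs irreducible degree
  let table : List Nat :=
    (List.range 256).foldl
      (fun t bcopy =>
        let s := (List.range 8).foldl
          (fun (st : Nat × Nat) i =>
            (if st.2 &&& 1 > 0 then st.1 ^^^ divs.getD i 0 else st.1, st.2 >>> 1))
          (0, bcopy)
        t.set bcopy s.1)
      (List.replicate 256 0)
  table.map Int.ofNat

-- ===== PORT B =====
-- termination fact for poly_mod's while loop: cancelling p1's leading term strictly shrinks p1
-- (stated before the port because pmLoop's decreasing_by cites it)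
theorem pmShrink (p1 p2 : Nat) (h1 : 0 < p2) (h2 : p2.size ≤ p1.size) :
    p1 ^^^ (p2 <<< (p1.size - p2.size)) < p1 := by
  have hsz2 : 0 < p2.size := Nat.size_pos.mpr h1
  have hsz1 : 0 < p1.size := lt_of_lt_of_le hsz2 h2
  have hb : (p2 <<< (p1.size - p2.size)).size = p1.size := by
    rw [Nat.size_shiftLeft (by omega) _]; omega
  have hlow : ∀ x : Nat, x.size = p1.size → 2 ^ (p1.size - 1) ≤ x := by
    intro x hx
    exact Nat.lt_size.mp (by omega)
  have hhigh : ∀ x : Nat, x.size = p1.size → x < 2 ^ (p1.size - 1) * 2 := by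
    intro x hx
    have := Nat.lt_size_self x
    rw [hx, show p1.size = (p1.size - 1) + 1 by omega, pow_succ] at this
    exact this
  have hxor : p1 ^^^ (p2 <<< (p1.size - p2.size)) < 2 ^ (p1.size - 1) := by
    apply Nat.lt_pow_two_of_testBit
    intro j hj
    rw [Nat.testBit_xor]
    rcases eq_or_lt_of_le hj with h | h
    · have hbit : ∀ x : Nat, x.size = p1.size → x.testBit (p1.size - 1) = true := by
        intro x hx
        rw [Nat.testBit_eq_decide_div_mod_eq]
        have h1 := hlow x hx
        have h2 := hhigh x hx
        have : x / 2 ^ (p1.size - 1) = 1 :=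
          Nat.div_eq_of_lt_le (by omega) (by omega)
        simp [this]
      rw [← h, hbit p1 rfl, hbit _ hb]; rfl
    · have hbit : ∀ x : Nat, x.size = p1.size → x.testBit j = false := by
        intro x hx
        apply Nat.testBit_lt_two_pow
        calc x < 2 ^ x.size := Nat.lt_size_self x
        _ ≤ 2 ^ j := Nat.pow_le_pow_right (by norm_num) (by omega)
      rw [hbit p1 rfl, hbit _ hb]; rfl
  exact lt_of_lt_of_le hxor (hlow p1 rfl)

-- while p1.bit_length() >= p2.bit_length(): p1 ^= p2 << (p1.bit_length() - p2.bit_length())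
-- (the '0 < p2' conjunct only makes the recursion total; polyMod calls it under that guard)
def pmLoop (p1 p2 : Nat) : Nat :=
  if h : 0 < p2 ∧ p2.size ≤ p1.size then
    pmLoop (p1 ^^^ (p2 <<< (p1.size - p2.size))) p2
  else p1
termination_by p1
decreasing_by exact pmShrink p1 p2 h.1 h.2

-- if p2 > 0: <reduction loop>; return p1
def polyMod (p1 p2 : Nat) : Nat :=
  if 0 < p2 then pmLoop p1 p2 else p1

-- table = [0]; for i in range(8): d = poly_mod(...); table = table + [x ^ d for x in table]
def compute_outgoing_table_alt (irreducible : Int) (degree : Int) : List Int :=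
  ((List.range 8).foldl
      (fun t (i : Nat) =>
        let d := polyMod (2 ^ (((i : Int) + degree + 1).toNat)) irreducible.toNat
        t ++ t.map (fun x => x ^^^ d))
      [0]).map Int.ofNat

-- ===== PRECONDITION & SPEC =====
-- Pre_ excludes exactly the inputs where the Python A does not return normally: degree ≤ -2 makes
-- '1 << (degree + 1)' raise ValueError, and irreducible = 0 makes divide_polynomial's last loop spin
-- forever (p2 stays 0 ≥ org_p2 = 0). For irreducible < 0 A returns (the subtraction loop is skipped,
-- each div is its dividend), and the ports match it there.
def Pre_compute_outgoing_table (irreducible : Int) (degree : Int) : Prop :=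
  irreducible ≠ 0 ∧ -1 ≤ degree
instance (irreducible : Int) (degree : Int) : Decidable (Pre_compute_outgoing_table irreducible degree) := by
  unfold Pre_compute_outgoing_table; infer_instance

def pvWitness_compute_outgoing_table : Int × Int := (283, 7)

def Spec_compute_outgoing_table (irreducible : Int) (degree : Int) (out : List Int) : Prop :=
  out = compute_outgoing_table_alt irreducible degree
instance (irreducible : Int) (degree : Int) (out : List Int) : Decidable (Spec_compute_outgoing_table irreducible degree out) := by
  unfold Spec_compute_outgoing_table; infer_instance

-- ===== CLAIM (what is proved, stated in full; the proofs are below) =====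
def Claim_equal_compute_outgoing_table : Prop :=
  ∀ (irreducible : Int) (degree : Int), Dom_compute_outgoing_table irreducible degree →
    Pre_compute_outgoing_table irreducible degree →
    Spec_compute_outgoing_table irreducible degree (compute_outgoing_table irreducible degree)

-- ===== LEMMAS AND PROOFS =====

-- ---- helper equivalence: the three mask loops compute the bit_length reduction ----

theorem dpLoop1_eq (p2 : Nat) : ∀ k j, p2.size - j ≤ k → dpLoop1 (2^j) p2 = 2 ^ max j p2.size := by
  intro k
  induction k with
  | zero =>
    intro j hj
    rw [dpLoop1, if_neg (by
      rintro ⟨-, hle⟩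
      exact absurd (Nat.lt_size.mpr hle) (by omega))]
    congr 1; omega
  | succ k ih =>
    intro j hj
    by_cases hle : 2^j ≤ p2
    · have hlt : j < p2.size := Nat.lt_size.mpr hle
      rw [dpLoop1, if_pos ⟨Nat.two_pow_pos j, hle⟩,
        show 2^j * 2 = 2^(j+1) by rw [pow_succ], ih (j+1) (by omega)]
      congr 1; omega
    · rw [dpLoop1, if_neg (by rintro ⟨-, h⟩; exact hle h)]
      have : ¬ j < p2.size := fun h => hle (Nat.lt_size.mp h)
      congr 1; omega

theorem dpLoop2_eq (p1 : Nat) : ∀ k j q, p1.size - j ≤ k →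
    dpLoop2 (2^j) q p1 = (2 ^ (j + (p1.size - j)), q * 2 ^ (p1.size - j)) := by
  intro k
  induction k with
  | zero =>
    intro j q hj
    rw [dpLoop2, if_neg (by
      rintro ⟨-, hle⟩
      exact absurd (Nat.lt_size.mpr hle) (by omega))]
    have h0 : p1.size - j = 0 := by omega
    rw [h0]; simp
  | succ k ih =>
    intro j q hj
    by_cases hle : 2^j ≤ p1
    · have hlt : j < p1.size := Nat.lt_size.mpr hle
      rw [dpLoop2, if_pos ⟨Nat.two_pow_pos j, hle⟩,
        show 2^j * 2 = 2^(j+1) by rw [pow_succ], ih (j+1) (q*2) (by omega)]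
      have h1 : j + 1 + (p1.size - (j+1)) = j + (p1.size - j) := by omega
      have h2 : q * 2 * 2 ^ (p1.size - (j+1)) = q * 2 ^ (p1.size - j) := by
        rw [show p1.size - j = (p1.size - (j+1)) + 1 by omega, pow_succ]; ring
      rw [h1, h2]
    · rw [dpLoop2, if_neg (by rintro ⟨-, h⟩; exact hle h)]
      have : ¬ j < p1.size := fun h => hle (Nat.lt_size.mp h)
      have h0 : p1.size - j = 0 := by omega
      rw [h0]; simp

-- bounds of a number whose size is exactly L+1
theorem size_band (x L : Nat) (hlow : 2 ^ L ≤ x) (hhigh : x < 2 ^ L * 2) : x.size = L + 1 := by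
  have h1 : L < x.size := Nat.lt_size.mpr hlow
  have h2 : x.size ≤ L + 1 := Nat.size_le.mpr (by rw [pow_succ]; exact hhigh)
  omega

-- cancelling the common leading bit of two same-size numbers drops below it
theorem xor_leading_cancel (L a b : Nat) (ha1 : 2^L ≤ a) (ha2 : a < 2^L * 2)
    (hb1 : 2^L ≤ b) (hb2 : b < 2^L * 2) : a ^^^ b < 2^L := by
  apply Nat.lt_pow_two_of_testBit
  intro j hj
  rw [Nat.testBit_xor]
  rcases eq_or_lt_of_le hj with h | h
  · have hbit : ∀ x : Nat, 2^L ≤ x → x < 2^L*2 → x.testBit L = true := by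
      intro x hx1 hx2
      rw [Nat.testBit_eq_decide_div_mod_eq]
      have : x / 2 ^ L = 1 := Nat.div_eq_of_lt_le (by omega) (by omega)
      simp [this]
    rw [← h, hbit a ha1 ha2, hbit b hb1 hb2]; rfl
  · have hbit : ∀ x : Nat, x < 2^L*2 → x.testBit j = false := by
      intro x hx
      apply Nat.testBit_lt_two_pow
      calc x < 2^L*2 := hx
      _ = 2^(L+1) := (pow_succ 2 L).symm
      _ ≤ 2^j := Nat.pow_le_pow_right (by norm_num) (by omega)
    rw [hbit a ha2, hbit b hb2]; rfl

-- A's subtraction loop, started with p2 and mask aligned s places above org, is B's reduction loop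
theorem dpLoop3_eq (org : Nat) (horg : 0 < org) : ∀ s p1, p1 < 2 ^ (org.size + s) →
    dpLoop3 p1 (org * 2^s) (2 ^ (org.size - 1 + s)) org = pmLoop p1 org := by
  have hso : 0 < org.size := Nat.size_pos.mpr horg
  have horgl : 2 ^ (org.size - 1) ≤ org := Nat.lt_size.mp (by omega)
  have horgh : org < 2 ^ (org.size - 1) * 2 := by
    have := Nat.lt_size_self org
    rwa [show org.size = (org.size - 1) + 1 by omega, pow_succ] at this
  intro s
  induction s with
  | zero =>
    intro p1 hp1
    rw [dpLoop3, dif_pos ⟨horg, by simp⟩]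
    rw [Nat.two_pow_and]
    simp only [Nat.add_zero, pow_zero, Nat.mul_one] at hp1 ⊢
    by_cases hbit : p1.testBit (org.size - 1)
    · -- the leading positions line up: both loops XOR once and stop
      have hp1l : 2 ^ (org.size - 1) ≤ p1 := Nat.ge_two_pow_of_testBit hbit
      have hp1h : p1 < 2 ^ (org.size - 1) * 2 := by
        rw [← pow_succ, show org.size - 1 + 1 = org.size by omega]
        exact hp1
      have hsz : p1.size = org.size := by
        rw [size_band p1 (org.size - 1) hp1l hp1h]; omega
      have hxlt : p1 ^^^ org < 2 ^ (org.size - 1) :=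
        xor_leading_cancel (org.size - 1) p1 org hp1l hp1h horgl horgh
      rw [if_pos (by simp [hbit])]
      rw [dpLoop3, dif_neg (by rintro ⟨-, hle⟩; omega)]
      rw [pmLoop, dif_pos ⟨horg, by omega⟩]
      rw [show p1.size - org.size = 0 by omega]
      rw [pmLoop, dif_neg (by
        rintro ⟨-, hle⟩
        have : (p1 ^^^ org <<< 0).size ≤ org.size - 1 := by
          apply Nat.size_le.mpr
          rw [Nat.shiftLeft_eq, pow_zero, Nat.mul_one]
          exact lt_of_lt_of_le hxlt (Nat.pow_le_pow_right (by norm_num) (le_refl _))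
        omega)]
      rw [Nat.shiftLeft_eq, pow_zero, Nat.mul_one]
    · -- no leading coefficient here: A's step is a no-op and B's loop does not run
      have hp1h : p1 < 2 ^ (org.size - 1) := by
        apply Nat.lt_pow_two_of_testBit
        intro j hj
        rcases eq_or_lt_of_le hj with h | h
        · rw [← h]; simpa using hbit
        · apply Nat.testBit_lt_two_pow
          calc p1 < 2 ^ org.size := hp1
          _ ≤ 2 ^ j := Nat.pow_le_pow_right (by norm_num) (by omega)
      rw [if_neg (by simp [hbit])]
      rw [dpLoop3, dif_neg (by rintro ⟨-, hle⟩; omega)]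
      rw [pmLoop, dif_neg (by
        rintro ⟨-, hle⟩
        have : p1.size ≤ org.size - 1 := Nat.size_le.mpr hp1h
        omega)]
  | succ s ih =>
    intro p1 hp1
    rw [dpLoop3, dif_pos ⟨horg, Nat.le_mul_of_pos_right org (Nat.two_pow_pos _)⟩]
    rw [Nat.two_pow_and]
    have hdiv2 : org * 2 ^ (s+1) / 2 = org * 2 ^ s := by
      rw [pow_succ, ← mul_assoc]; omega
    have hmask2 : 2 ^ (org.size - 1 + (s+1)) / 2 = 2 ^ (org.size - 1 + s) := by
      rw [show org.size - 1 + (s+1) = (org.size - 1 + s) + 1 by omega, pow_succ]; omega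
    by_cases hbit : p1.testBit (org.size - 1 + (s+1))
    · -- leading term present: A XORs the shifted divisor; B's loop takes the same step
      have hidx : org.size - 1 + (s+1) = org.size + s := by omega
      have hp1l : 2 ^ (org.size + s) ≤ p1 := by
        have := Nat.ge_two_pow_of_testBit hbit
        rwa [hidx] at this
      have hp1h : p1 < 2 ^ (org.size + s) * 2 := by
        rw [← pow_succ]
        exact hp1
      have hshl : org * 2 ^ (s+1) = org <<< (s+1) := by rw [Nat.shiftLeft_eq]
      have hb1 : 2 ^ (org.size + s) ≤ org * 2 ^ (s+1) := by
        calc 2 ^ (org.size + s) = 2 ^ (org.size - 1) * 2 ^ (s+1) := by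
              rw [← pow_add]; congr 1; omega
        _ ≤ org * 2 ^ (s+1) := Nat.mul_le_mul_right _ horgl
      have hb2 : org * 2 ^ (s+1) < 2 ^ (org.size + s) * 2 := by
        calc org * 2 ^ (s+1) < (2 ^ (org.size - 1) * 2) * 2 ^ (s+1) :=
              (Nat.mul_lt_mul_right (Nat.two_pow_pos _)).mpr horgh
        _ = 2 ^ (org.size + s) * 2 := by
              rw [← pow_succ, ← pow_add, ← pow_succ]
              congr 1; omega
      have hsz : p1.size = org.size + s + 1 := size_band p1 (org.size + s) hp1l hp1h
      have hxlt : p1 ^^^ org * 2 ^ (s+1) < 2 ^ (org.size + s) :=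
        xor_leading_cancel (org.size + s) p1 _ hp1l hp1h hb1 hb2
      rw [if_pos (by rw [hbit]; simp only [Bool.toNat_true, Nat.mul_one]; exact Nat.two_pow_pos _)]
      rw [hdiv2, hmask2, ih _ hxlt]
      conv_rhs => rw [pmLoop]
      rw [dif_pos ⟨horg, show org.size ≤ p1.size by omega⟩]
      have harg : p1 ^^^ org <<< (p1.size - org.size) = p1 ^^^ org * 2 ^ (s+1) := by
        rw [Nat.shiftLeft_eq, show p1.size - org.size = s + 1 by omega]
      rw [harg]
    · -- no coefficient at this position: A's step is a no-op, B's state is unchanged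
      have hp1' : p1 < 2 ^ (org.size + s) := by
        apply Nat.lt_pow_two_of_testBit
        intro j hj
        rcases eq_or_lt_of_le hj with h | h
        · rw [← h]
          have : org.size - 1 + (s+1) = org.size + s := by omega
          rw [← this]; simpa using hbit
        · apply Nat.testBit_lt_two_pow
          calc p1 < 2 ^ (org.size + (s+1)) := hp1
          _ ≤ 2 ^ j := Nat.pow_le_pow_right (by norm_num) (by omega)
      rw [if_neg (by simp [hbit])]
      rw [hdiv2, hmask2, ih _ hp1']

-- the whole helper: A's divide_polynomial is B's poly_mod
theorem dividePolynomial_eq_polyMod (p1 p2 : Nat) : dividePolynomial p1 p2 = polyMod p1 p2 := by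
  by_cases hp2 : 0 < p2
  · have hso : 0 < p2.size := Nat.size_pos.mpr hp2
    have e1 : dpLoop1 1 p2 = 2 ^ p2.size := by
      have h := dpLoop1_eq p2 p2.size 0 (by omega)
      rw [pow_zero] at h
      rw [h, Nat.max_eq_right (Nat.zero_le _)]
    have e2 : dpLoop2 (2 ^ p2.size) p2 p1
        = (2 ^ (p2.size + (p1.size - p2.size)), p2 * 2 ^ (p1.size - p2.size)) :=
      dpLoop2_eq p1 p1.size p2.size p2 (by omega)
    show dpLoop3 p1 (dpLoop2 (dpLoop1 1 p2) p2 p1).2 ((dpLoop2 (dpLoop1 1 p2) p2 p1).1 / 2) p2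
      = polyMod p1 p2
    rw [e1, e2]
    unfold polyMod
    set k := p1.size - p2.size with hk
    have hmask : 2 ^ (p2.size + k) / 2 = 2 ^ (p2.size - 1 + k) := by
      rw [show p2.size + k = (p2.size - 1 + k) + 1 by omega, pow_succ]; omega
    show dpLoop3 p1 (p2 * 2 ^ k) (2 ^ (p2.size + k) / 2) p2 = _
    rw [hmask, dpLoop3_eq p2 hp2 k p1 (by
      by_cases hle : p1.size ≤ p2.size
      · calc p1 < 2 ^ p1.size := Nat.lt_size_self p1
        _ ≤ 2 ^ (p2.size + k) := Nat.pow_le_pow_right (by norm_num) (by omega)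
      · have hsk : p2.size + k = p1.size := by omega
        rw [hsk]; exact Nat.lt_size_self p1), if_pos hp2]
  · have hp2' : p2 = 0 := by omega
    subst hp2'
    have e1 : dpLoop1 1 0 = 1 := by rw [dpLoop1, if_neg (by omega)]
    have e2 : dpLoop2 1 0 p1 = (2 ^ (0 + (p1.size - 0)), 0 * 2 ^ (p1.size - 0)) := by
      have h := dpLoop2_eq p1 p1.size 0 0 (by omega)
      rwa [pow_zero] at h
    show dpLoop3 p1 (dpLoop2 (dpLoop1 1 0) 0 p1).2 ((dpLoop2 (dpLoop1 1 0) 0 p1).1 / 2) 0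
      = polyMod p1 0
    rw [e1, e2]
    unfold polyMod
    show dpLoop3 p1 (0 * 2 ^ (p1.size - 0)) (2 ^ (0 + (p1.size - 0)) / 2) 0 = _
    rw [dpLoop3, dif_neg (by omega), if_neg (by omega)]

-- ---- table equivalence: both builds hold the XOR of divs over the set bits of the index ----

-- the XOR of D j over the set bits j < i of b: the common value of both tables
def eBits (D : Nat → Nat) (i b : Nat) : Nat :=
  (List.range i).foldl (fun s j => if b.testBit j then s ^^^ D j else s) 0

theorem foldl_bits_congr (b : Nat) (lst : List Nat) (D D' : Nat → Nat) (s : Nat)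
    (h : ∀ j ∈ lst, D j = D' j) :
    lst.foldl (fun s j => if b.testBit j then s ^^^ D j else s) s
      = lst.foldl (fun s j => if b.testBit j then s ^^^ D' j else s) s := by
  induction lst generalizing s with
  | nil => rfl
  | cons a t ih =>
    simp only [List.foldl_cons, h a List.mem_cons_self]
    exact ih _ (fun j hj => h j (List.mem_cons_of_mem _ hj))

theorem foldl_bits_testBit_congr (D : Nat → Nat) (b b' : Nat) (lst : List Nat) (s : Nat)
    (h : ∀ j ∈ lst, b.testBit j = b'.testBit j) :
    lst.foldl (fun s j => if b.testBit j then s ^^^ D j else s) s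
      = lst.foldl (fun s j => if b'.testBit j then s ^^^ D j else s) s := by
  induction lst generalizing s with
  | nil => rfl
  | cons a t ih =>
    simp only [List.foldl_cons, h a List.mem_cons_self]
    exact ih _ (fun j hj => h j (List.mem_cons_of_mem _ hj))

theorem eBits_succ (D : Nat → Nat) (i b : Nat) :
    eBits D (i+1) b = if b.testBit i then eBits D i b ^^^ D i else eBits D i b := by
  unfold eBits
  rw [List.range_succ, List.foldl_append]
  simp only [List.foldl_cons, List.foldl_nil]

theorem eBits_low (D : Nat → Nat) (i b : Nat) (hb : b < 2^i) :
    eBits D (i+1) b = eBits D i b := by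
  rw [eBits_succ, Nat.testBit_lt_two_pow hb, if_neg (by simp)]

theorem eBits_high (D : Nat → Nat) (i b : Nat) (hb : b < 2^i) :
    eBits D (i+1) (2^i + b) = eBits D i b ^^^ D i := by
  rw [eBits_succ]
  have hbit : (2^i + b).testBit i = true := by
    rw [Nat.testBit_two_pow_add_eq, Nat.testBit_lt_two_pow hb]; rfl
  rw [if_pos hbit]
  congr 1
  unfold eBits
  apply foldl_bits_testBit_congr
  intro j hj
  exact Nat.testBit_two_pow_add_gt (List.mem_range.mp hj) b

-- B's doubling build computes eBits on the prefix of length 2^i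
theorem foldDoubling (D : Nat → Nat) : ∀ i : Nat,
    (List.range i).foldl (fun t j => t ++ t.map (fun x => x ^^^ D j)) [0]
      = (List.range (2^i)).map (eBits D i) := by
  intro i
  induction i with
  | zero =>
    simp only [List.range_zero, List.foldl_nil, pow_zero, List.range_one, List.map_cons, List.map_nil]
    rfl
  | succ i ih =>
    rw [List.range_succ, List.foldl_append, ih]
    simp only [List.foldl_cons, List.foldl_nil]
    rw [pow_succ, mul_two, List.range_add, List.map_append, List.map_map, List.map_map]
    congr 1
    · exact List.map_congr_left (fun b hb => (eBits_low D i b (List.mem_range.mp hb)).symm)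
    · exact List.map_congr_left (fun b hb => by
        simp only [Function.comp_apply]
        exact (eBits_high D i b (List.mem_range.mp hb)).symm)

-- A's inner loop computes the same XOR: the shifted-byte state is b >>> i
theorem innerA (d : List Nat) (n : Nat) (s b : Nat) :
    (List.range n).foldl
      (fun (st : Nat × Nat) i => (if st.2 &&& 1 > 0 then st.1 ^^^ d.getD i 0 else st.1, st.2 >>> 1))
      (s, b)
    = ((List.range n).foldl (fun s i => if b.testBit i then s ^^^ d.getD i 0 else s) s, b >>> n) := by
  induction n generalizing s with
  | zero => simp
  | succ n ih =>
    rw [List.range_succ, List.foldl_append, List.foldl_append, ih]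
    simp only [List.foldl_cons, List.foldl_nil]
    have hsh : (b >>> n) >>> 1 = b >>> (n+1) := (Nat.shiftRight_add b n 1).symm
    by_cases ht : b.testBit n
    · have h1 : (b >>> n) &&& 1 = 1 := by
        simp [Nat.testBit] at ht; simp [Nat.and_one_is_mod] at ht ⊢; omega
      simp [h1, ht, hsh]
    · have h1 : (b >>> n) &&& 1 = 0 := by
        simp [Nat.testBit] at ht; simp [Nat.and_one_is_mod] at ht ⊢; omega
      simp [h1, ht, hsh]

-- setting the element just past a prefix
theorem set_at_prefix (l1 l2 : List Nat) (n x : Nat) (h : n = l1.length) :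
    (l1 ++ l2).set n x = l1 ++ l2.set 0 x := by
  subst h; simp

-- a write-only indexed fold over range n fills the prefix with f
theorem foldl_set_range (f : Nat → Nat) (N : Nat) : ∀ n, n ≤ N →
    (List.range n).foldl (fun t b => t.set b (f b)) (List.replicate N 0)
      = (List.range n).map f ++ (List.replicate N 0).drop n := by
  intro n
  induction n with
  | zero => simp
  | succ n ih =>
    intro hn
    rw [List.range_succ, List.foldl_append, List.map_append, ih (by omega)]
    simp only [List.foldl_cons, List.foldl_nil, List.drop_replicate]
    rw [set_at_prefix _ _ n (f n) (by simp)]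
    rw [show N - n = (N - (n+1)) + 1 by omega, List.replicate_succ]
    simp

-- A's divs list is the range-8 map of the div function
theorem dpDivs_eq_map (irreducible degree : Int) :
    dpDivs irreducible degree
      = (List.range 8).map
          (fun (j : Nat) => dividePolynomial (2 ^ (((j : Int) + degree + 1).toNat)) irreducible.toNat) := by
  unfold dpDivs
  rw [foldl_set_range _ 8 8 (le_refl 8), List.drop_replicate]
  simp only [Nat.sub_self, List.replicate_zero, List.append_nil]

theorem getD_map_range (f : Nat → Nat) (n j : Nat) (h : j < n) :
    ((List.range n).map f).getD j 0 = f j := by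
  rw [List.getD_eq_getElem?_getD, List.getElem?_map, List.getElem?_range h]
  rfl

-- ===== VERDICT (by name: the statement is the Claim_ definition above) =====
theorem compute_outgoing_table_spec : Claim_equal_compute_outgoing_table := by
  intro irreducible degree _ _
  unfold Spec_compute_outgoing_table compute_outgoing_table compute_outgoing_table_alt
  set D : Nat → Nat :=
    fun (j : Nat) => polyMod (2 ^ (((j : Int) + degree + 1).toNat)) irreducible.toNat with hD
  rw [foldDoubling D 8]
  refine congrArg (List.map Int.ofNat) ?_
  set d := dpDivs irreducible degree with hd
  have hA : (List.range 256).foldl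
      (fun t bcopy =>
        t.set bcopy ((List.range 8).foldl
          (fun (st : Nat × Nat) i => (if st.2 &&& 1 > 0 then st.1 ^^^ d.getD i 0 else st.1, st.2 >>> 1))
          (0, bcopy)).1)
      (List.replicate 256 0)
      = (List.range 256).map
          (fun b => (List.range 8).foldl (fun s i => if b.testBit i then s ^^^ d.getD i 0 else s) 0) := by
    have h := foldl_set_range
      (fun b => (List.range 8).foldl (fun s i => if b.testBit i then s ^^^ d.getD i 0 else s) 0)
      256 256 (le_refl 256)
    simp only [List.drop_replicate, Nat.sub_self, List.replicate_zero, List.append_nil] at h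
    rw [← h]
    apply PySem.List.foldl_congr_mem
    intro t b _
    rw [innerA d 8 0 b]
  rw [hA]
  apply List.map_congr_left
  intro b _
  unfold eBits
  apply foldl_bits_congr
  intro j hj
  rw [hd, dpDivs_eq_map, getD_map_range _ 8 j (List.mem_range.mp hj),
    dividePolynomial_eq_polyMod]
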